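-- pv_equiv track=rewrite | github.com/leehwarang/Algorithm | programmers/12930.py | solution
-- ===== SOURCE A (Python) =====
-- def solution(s):
--     arr = []
--     arr = s.split(" ")
--     fullAnswer = ''
--     for a in arr:
--         answer = ''
--         for i, j in enumerate(a):
--             if i == 0:
--                 answer += j.upper()
--             elif i % 2 == 0: #짝수번째 문자이면
--                 answer += j.upper()
--             else: #홀수번째 문자이면
--                 answer += j.lower()
--         fullAnswer += answer
--         fullAnswer += ' '
--     return fullAnswer[0:len(fullAnswer)-1]
-- ===== SOURCE B (Python) =====
-- def solution(s):
--     out = []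
--     pos = 0
--     for c in s:
--         if c == ' ':
--             out.append(' ')
--             pos = 0
--         else:
--             out.append(c.upper() if pos % 2 == 0 else c.lower())
--             pos += 1
--     return ''.join(out)
-- ===== Notes on version B (the rewrite author's own statement) =====
-- stated objective: simpler
-- what changed: B replaces split-into-words / per-word enumerate / join-and-trim with a single pass over the string keeping a per-word position counter that resets at each space.
import Mathlib
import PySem

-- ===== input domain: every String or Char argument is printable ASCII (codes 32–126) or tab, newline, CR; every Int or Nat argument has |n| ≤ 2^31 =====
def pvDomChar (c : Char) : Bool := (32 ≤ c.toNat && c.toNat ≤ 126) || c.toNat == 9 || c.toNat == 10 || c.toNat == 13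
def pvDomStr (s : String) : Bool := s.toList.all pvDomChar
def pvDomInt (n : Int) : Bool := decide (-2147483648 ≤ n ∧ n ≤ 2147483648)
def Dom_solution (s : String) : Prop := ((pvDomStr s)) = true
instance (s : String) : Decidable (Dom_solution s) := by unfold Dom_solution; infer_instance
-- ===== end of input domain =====

-- B does the same job in one pass with a position counter reset at spaces, dropping A's split/join/trim (objective: simpler).

-- ===== PORT A =====
-- inner loop of A: answer built over enumerate(a)
def solutionWordA (a : List Char) : List Char :=
  (PySem.List.enumerate a).foldl
    (fun answer ij =>
      if ij.1 == 0 then answer ++ [PySem.Chars.upperChar ij.2]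
      else if PySem.Int.mod ij.1 2 == 0 then answer ++ [PySem.Chars.upperChar ij.2]
      else answer ++ [PySem.Chars.lowerChar ij.2]) []

def solution (s : String) : String :=
  let arr := PySem.Chars.splitOn s.toList [' ']
  let fullAnswer := arr.foldl (fun fa a => (fa ++ solutionWordA a) ++ [' ']) []
  String.mk (PySem.List.slice fullAnswer (some 0) (some ((fullAnswer.length : Int) - 1)))

-- ===== PORT B =====
-- one pass: pos counts the characters of the current word, spaces reset it
def solutionAltGo : List Char → Nat → List Char
  | [], _ => []
  | c :: t, pos =>
      if c = ' ' then ' ' :: solutionAltGo t 0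
      else (if pos % 2 == 0 then PySem.Chars.upperChar c else PySem.Chars.lowerChar c)
             :: solutionAltGo t (pos + 1)

def solution_alt (s : String) : String := String.mk (solutionAltGo s.toList 0)

-- ===== PRECONDITION & SPEC =====
def Spec_solution (s : String) (out : String) : Prop := out = solution_alt s
instance (s : String) (out : String) : Decidable (Spec_solution s out) := by unfold Spec_solution; infer_instance

-- ===== CLAIM (what is proved, stated in full; the proofs are below) =====
def Claim_equal_solution : Prop := ∀ (s : String), Dom_solution s → Spec_solution s (solution s)

-- ===== LEMMAS AND PROOFS =====

-- simple structural characterisation of s.split(" ")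
def mySplit : List Char → List (List Char)
  | [] => [[]]
  | c :: t =>
      if c = ' ' then [] :: mySplit t
      else match mySplit t with
           | [] => [[c]]
           | w :: ws => (c :: w) :: ws

theorem mySplit_ne_nil (l : List Char) : mySplit l ≠ [] := by
  cases l with
  | nil => simp [mySplit]
  | cons c t =>
    simp only [mySplit]
    split_ifs
    · simp
    · cases h : mySplit t <;> simp

theorem splitOn_go_eq (fuel : Nat) : ∀ (l cur : List Char) (acc : List (List Char)),
    l.length < fuel →
    PySem.Chars.splitOn.go [' '] fuel l cur acc =
      acc.reverse ++ (match mySplit l with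
                      | [] => [cur.reverse]
                      | w :: ws => (cur.reverse ++ w) :: ws) := by
  induction fuel with
  | zero => intro l cur acc h; omega
  | succ fuel ih =>
    intro l cur acc h
    cases l with
    | nil => simp [PySem.Chars.splitOn.go, mySplit]
    | cons c rest =>
      by_cases hc : c = ' '
      · subst hc
        have : ([' '] : List Char).isPrefixOf (' ' :: rest) = true := by
          simp [List.isPrefixOf]
        rw [PySem.Chars.splitOn.go]
        simp only [this, if_pos]
        rw [ih]
        · simp only [mySplit, if_pos rfl]
          cases hms : mySplit rest with
          | nil => exact absurd hms (mySplit_ne_nil _)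
          | cons w ws => simp [hms]
        · simp at h ⊢; omega
      · have hpre : ([' '] : List Char).isPrefixOf (c :: rest) = false := by
          simp [List.isPrefixOf, hc]
          intro h'; exact hc h'.symm
        rw [PySem.Chars.splitOn.go]
        simp only [hpre]
        rw [if_neg (by simp [hpre])]
        rw [ih]
        · simp only [mySplit, if_neg hc]
          cases hms : mySplit rest with
          | nil => exact absurd hms (mySplit_ne_nil _)
          | cons w ws => simp [hms]
        · simp at h ⊢; omega

theorem splitOn_eq (cs : List Char) : PySem.Chars.splitOn cs [' '] = mySplit cs := by
  unfold PySem.Chars.splitOn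
  rw [splitOn_go_eq (cs.length + 1) cs [] [] (by omega)]
  cases hms : mySplit cs with
  | nil => exact absurd hms (mySplit_ne_nil _)
  | cons w ws => simp

-- index-parity map: what A's inner loop computes on a word starting at position pos
def gmap : Nat → List Char → List Char
  | _, [] => []
  | pos, c :: t =>
      (if pos % 2 == 0 then PySem.Chars.upperChar c else PySem.Chars.lowerChar c) :: gmap (pos + 1) t

theorem enumerate_fold_eq (a : List Char) : ∀ (k : Nat) (acc : List Char),
    (PySem.List.enumerate a (k : Int)).foldl
      (fun answer ij =>
        if ij.1 == 0 then answer ++ [PySem.Chars.upperChar ij.2]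
        else if PySem.Int.mod ij.1 2 == 0 then answer ++ [PySem.Chars.upperChar ij.2]
        else answer ++ [PySem.Chars.lowerChar ij.2]) acc
    = acc ++ gmap k a := by
  induction a with
  | nil => intro k acc; simp [PySem.List.enumerate, gmap]
  | cons c t ih =>
    intro k acc
    rw [PySem.List.enumerate]
    simp only [List.foldl_cons]
    have hcast : ((k : Int) + 1) = ((k + 1 : Nat) : Int) := by push_cast; ring
    rw [hcast, ih (k + 1)]
    by_cases hk : k = 0
    · subst hk; simp [gmap]
    · have h0 : ((k : Int) == 0) = false := by
        simp; exact_mod_cast hk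
      have hmod : PySem.Int.mod (k : Int) 2 = ((k % 2 : Nat) : Int) := by
        exact_mod_cast PySem.Int.mod_natCast k 2
      rcases Nat.mod_two_eq_zero_or_one k with hp | hp <;>
        rw [hmod, hp] <;> simp [gmap, h0, hp]

theorem wordA_eq (a : List Char) : solutionWordA a = gmap 0 a := by
  have := enumerate_fold_eq a 0 []
  simpa [solutionWordA] using this

-- joined words with single-space separators, first word starting at position pos
def interAB : Nat → List (List Char) → List Char
  | _, [] => []
  | pos, [w] => gmap pos w
  | pos, w :: ws => gmap pos w ++ ' ' :: interAB 0 ws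

theorem altGo_eq (cs : List Char) : ∀ (pos : Nat),
    solutionAltGo cs pos = interAB pos (mySplit cs) := by
  induction cs with
  | nil => intro pos; simp [solutionAltGo, mySplit, interAB, gmap]
  | cons c t ih =>
    intro pos
    by_cases hc : c = ' '
    · subst hc
      rw [solutionAltGo, if_pos rfl, ih 0]
      simp only [mySplit]
      cases hms : mySplit t with
      | nil => exact absurd hms (mySplit_ne_nil _)
      | cons w ws => simp [interAB, gmap]
    · rw [solutionAltGo, if_neg hc, ih (pos + 1)]
      simp only [mySplit, if_neg hc]
      cases hms : mySplit t with
      | nil => exact absurd hms (mySplit_ne_nil _)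
      | cons w ws =>
        cases ws with
        | nil => simp [interAB, gmap]
        | cons w' ws' => simp [interAB, gmap]

theorem flat_ne_nil (ws : List (List Char)) (h : ws ≠ []) :
    List.flatMap (fun w => gmap 0 w ++ [' ']) ws ≠ [] := by
  cases ws with
  | nil => exact absurd rfl h
  | cons w ws => simp

theorem dropLast_flat_eq (ws : List (List Char)) (h : ws ≠ []) :
    (List.flatMap (fun w => gmap 0 w ++ [' ']) ws).dropLast = interAB 0 ws := by
  induction ws with
  | nil => exact absurd rfl h
  | cons w ws ih =>
    cases ws with
    | nil => simp [interAB]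
    | cons w' ws' =>
      have hne : List.flatMap (fun w => gmap 0 w ++ [' ']) (w' :: ws') ≠ [] :=
        flat_ne_nil _ (by simp)
      rw [List.flatMap_cons, List.dropLast_append_of_ne_nil hne, ih (by simp)]
      simp [interAB]

-- ===== VERDICT (by name: the statement is the Claim_ definition above) =====
theorem solution_spec : Claim_equal_solution := by
  intro s _
  unfold Spec_solution solution solution_alt
  dsimp only
  rw [splitOn_eq]
  have hstep : (fun (fa : List Char) (a : List Char) => (fa ++ solutionWordA a) ++ [' '])
      = fun fa a => fa ++ (gmap 0 a ++ [' ']) := by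
    funext fa a; rw [wordA_eq, List.append_assoc]
  rw [hstep, PySem.List.foldl_append_eq_flatMap (fun a => gmap 0 a ++ [' ']) (mySplit s.toList) []]
  have hne : List.flatMap (fun w => gmap 0 w ++ [' ']) (mySplit s.toList) ≠ [] :=
    flat_ne_nil _ (mySplit_ne_nil _)
  rw [List.nil_append]
  set full := List.flatMap (fun w => gmap 0 w ++ [' ']) (mySplit s.toList) with hfull
  have hlen : 1 ≤ full.length := by
    cases hf : full with
    | nil => exact absurd hf hne
    | cons a b => simp
  have hb : (0 : Int) ≤ (full.length : Int) - 1 := by omega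
  rw [PySem.List.slice_toNat full (le_refl 0) hb]
  have htn : ((full.length : Int) - 1).toNat = full.length - 1 := by omega
  rw [htn]
  simp only [Int.toNat_zero, Nat.sub_zero, List.drop_zero]
  rw [← List.dropLast_eq_take, dropLast_flat_eq _ (mySplit_ne_nil _), ← altGo_eq]
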